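-- pv_equiv track=rewrite | github.com/zenzl4/RH-VR-RDY | analysis/criteria_matcher.py | get_criteria_from_text
-- ===== SOURCE A (Python) =====
-- def get_criteria_from_text(criteria_text):
--     """Parse criteria from text input"""
--     if not criteria_text.strip():
--         return []
--
--     criteria_items = []
--     for line in criteria_text.split('\n'):
--         if ',' in line:
--             criteria_items.extend([item.strip() for item in line.split(',') if item.strip()])
--         else:
--             if line.strip():
--                 criteria_items.append(line.strip())
--
--     # Fallback if no criteria were parsed
--     if not criteria_items and criteria_text.strip():
--         criteria_items = [criteria_text.strip()]
--
--     return criteria_items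
-- ===== SOURCE B (Python) =====
-- def get_criteria_from_text(criteria_text):
--     """Parse criteria from text: one linear scan over the characters,
--     cutting a token at every newline or comma."""
--     items = []
--     token = []
--     for ch in criteria_text + '\n':
--         if ch in '\n,':
--             piece = ''.join(token).strip()
--             if piece:
--                 items.append(piece)
--             token = []
--         else:
--             token.append(ch)
--     if items:
--         return items
--     stripped = criteria_text.strip()
--     return [stripped] if stripped else []
-- ===== Notes on version B (the rewrite author's own statement) =====
-- stated objective: alternative
-- what changed: Replaces A's line split with a per-line comma/no-comma branch and nested comma split by a single linear character scan that cuts a token at every newline or comma and collects the stripped non-empty tokens in one pass.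
import Mathlib
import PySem

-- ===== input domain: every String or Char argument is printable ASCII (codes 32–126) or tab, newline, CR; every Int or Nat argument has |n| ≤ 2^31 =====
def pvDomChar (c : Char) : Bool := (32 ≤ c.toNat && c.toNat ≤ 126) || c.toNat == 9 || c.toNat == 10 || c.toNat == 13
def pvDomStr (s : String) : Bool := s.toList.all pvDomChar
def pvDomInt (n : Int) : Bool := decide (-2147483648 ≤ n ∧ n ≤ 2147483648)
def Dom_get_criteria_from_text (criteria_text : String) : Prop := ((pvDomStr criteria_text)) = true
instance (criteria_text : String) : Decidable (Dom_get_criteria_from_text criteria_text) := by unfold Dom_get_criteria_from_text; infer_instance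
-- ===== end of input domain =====

-- B replaces A's line split with per-line comma branching and nested comma splits by a
-- single linear character scan that cuts a token at every newline or comma (objective: alternative).


-- ===== PORT A =====
def get_criteria_from_text (criteria_text : String) : List String :=
  if PySem.Str.strip criteria_text = "" then []
  else
    let criteria_items :=
      ((PySem.Str.split? criteria_text "\n").getD []).foldl (fun acc line =>
        if PySem.Str.isIn "," line then
          acc ++ (((PySem.Str.split? line ",").getD []).map PySem.Str.strip).filter
            (fun item => item ≠ "")
        else if PySem.Str.strip line ≠ "" then acc ++ [PySem.Str.strip line]
        else acc) ([] : List String)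
    if criteria_items = [] ∧ PySem.Str.strip criteria_text ≠ "" then
      [PySem.Str.strip criteria_text]
    else criteria_items


-- ===== PORT B =====
-- Source B's scanner loop; ''.join(token).strip() is ported exactly as
-- String.ofList (PySem.Chars.strip token).
def pvScanB (items : List String) (token : List Char) : List Char → List String
  | [] => items
  | c :: cs =>
    if c == '\n' || c == ',' then
      let piece := PySem.Chars.strip token
      pvScanB (if piece ≠ [] then items ++ [String.ofList piece] else items) [] cs
    else pvScanB items (token ++ [c]) cs

def get_criteria_from_text_alt (criteria_text : String) : List String :=
  let items := pvScanB [] [] (criteria_text.toList ++ ['\n'])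
  if items ≠ [] then items
  else
    let stripped := PySem.Str.strip criteria_text
    if stripped ≠ "" then [stripped] else []


-- ===== PRECONDITION & SPEC =====
def Spec_get_criteria_from_text (criteria_text : String) (out : List String) : Prop := out = get_criteria_from_text_alt criteria_text
instance (criteria_text : String) (out : List String) : Decidable (Spec_get_criteria_from_text criteria_text out) := by unfold Spec_get_criteria_from_text; infer_instance

-- ===== CLAIM (what is proved, stated in full; the proofs are below) =====
def Claim_equal_get_criteria_from_text : Prop := ∀ (criteria_text : String), Dom_get_criteria_from_text criteria_text → Spec_get_criteria_from_text criteria_text (get_criteria_from_text criteria_text)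

-- ===== LEMMAS AND PROOFS =====
def pvDelim (c : Char) : Bool := c == '\n' || c == ','
theorem pv_modifyHead_id (l : List (List Char)) : List.modifyHead (fun x => x) l = l := by cases l <;> rfl
theorem pv_modifyHead_comp (f g : List Char → List Char) (l : List (List Char)) :
    List.modifyHead f (List.modifyHead g l) = List.modifyHead (fun x => f (g x)) l := by cases l <;> rfl
theorem pv_modifyHead_append (f : List Char → List Char) (xs ys : List (List Char))
    (h : xs ≠ []) : List.modifyHead f (xs ++ ys) = List.modifyHead f xs ++ ys := by
  cases xs with
  | nil => exact absurd rfl h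
  | cons a t => rfl
theorem pv_go (c : Char) (fuel : Nat) : ∀ (l cur : List Char) (acc : List (List Char)),
    l.length ≤ fuel →
    PySem.Chars.splitOn.go [c] fuel l cur acc
      = acc.reverse ++ List.modifyHead (cur.reverse ++ ·) (List.splitOnP (fun x => x == c) l) := by
  induction fuel with
  | zero =>
    intro l cur acc h
    have hl : l = [] := by cases l <;> simp_all
    subst hl
    simp [PySem.Chars.splitOn.go, List.splitOnP_nil]
  | succ n ih =>
    intro l cur acc h
    cases l with
    | nil => simp [PySem.Chars.splitOn.go, List.splitOnP_nil]
    | cons x rest =>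
      rw [PySem.Chars.splitOn.go]
      by_cases hx : x = c
      · subst hx
        simp only [List.isPrefixOf, BEq.rfl, Bool.and_self, if_pos,
          List.length_singleton, List.drop_one, List.tail_cons]
        rw [ih rest [] _ (by simpa using Nat.le_of_succ_le_succ h)]
        rw [List.splitOnP_cons]
        simp [pv_modifyHead_id]
      · have hbe : (x == c) = false := by simp [hx]
        have hpre : List.isPrefixOf [c] (x :: rest) = false := by
          simp [List.isPrefixOf]
          intro hc; exact absurd hc.symm hx
        rw [hpre]
        simp only [Bool.false_eq_true, if_false]
        rw [ih rest (x :: cur) acc (by simpa using Nat.le_of_succ_le_succ h)]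
        rw [List.splitOnP_cons, hbe]
        simp only [Bool.false_eq_true, if_false, pv_modifyHead_comp]
        simp

theorem pv_splitOn_single (c : Char) (l : List Char) :
    PySem.Chars.splitOn l [c] = List.splitOnP (fun x => x == c) l := by
  show PySem.Chars.splitOn.go [c] (l.length + 1) l [] [] = _
  rw [pv_go c (l.length + 1) l [] [] (Nat.le_succ _)]
  simp [pv_modifyHead_id]

theorem pv_split_both : ∀ (cs : List Char),
    List.splitOnP pvDelim cs
      = (List.splitOnP (fun x => x == '\n') cs).flatMap
          (fun l => List.splitOnP (fun x => x == ',') l) := by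
  intro cs
  induction cs with
  | nil => simp [List.splitOnP_nil]
  | cons c cs ih =>
    obtain ⟨h, t, hht⟩ : ∃ h t, List.splitOnP (fun x => x == '\n') cs = h :: t := by
      cases hcs : List.splitOnP (fun x => x == '\n') cs with
      | nil => exact absurd hcs (List.splitOnP_ne_nil _ _)
      | cons a t => exact ⟨a, t, rfl⟩
    rw [List.splitOnP_cons, List.splitOnP_cons]
    by_cases hn : c = '\n'
    · subst hn
      simp only [show pvDelim '\n' = true from rfl, if_pos, BEq.rfl]
      simp [ih]
    · by_cases hcm : c = ','
      · subst hcm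
        rw [show pvDelim ',' = true from rfl,
            show ((',' : Char) == '\n') = false from rfl]
        simp only [if_true, Bool.false_eq_true, if_false]
        rw [hht] at ih ⊢
        simp only [List.modifyHead_cons, List.flatMap_cons, List.splitOnP_cons,
          show ((',' : Char) == ',') = true from rfl, if_pos]
        rw [List.flatMap_cons] at ih
        simp_all
      · have hd : pvDelim c = false := by simp [pvDelim, hn, hcm]
        have hn' : (c == '\n') = false := by simp [hn]
        rw [hd, hn']
        simp only [Bool.false_eq_true, if_false]
        rw [hht] at ih ⊢
        simp only [List.modifyHead_cons, List.flatMap_cons, List.splitOnP_cons]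
        have hm : (c == ',') = false := by simp [hcm]
        rw [hm]
        simp only [Bool.false_eq_true, if_false]
        rw [List.flatMap_cons] at ih
        rw [ih, pv_modifyHead_append _ _ _ (List.splitOnP_ne_nil _ _)]

theorem pv_splitOnP_prefix (p : Char → Bool) (t : List Char) :
    ∀ (cs : List Char), (∀ x ∈ t, p x = false) →
    List.splitOnP p (t ++ cs) = List.modifyHead (t ++ ·) (List.splitOnP p cs) := by
  induction t with
  | nil => intro cs _; simp [pv_modifyHead_id]
  | cons a t ih =>
    intro cs h
    have ha : p a = false := h a (by simp)
    rw [List.cons_append, List.splitOnP_cons, ha]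
    simp only [Bool.false_eq_true, if_false]
    rw [ih cs (fun x hx => h x (by simp [hx])), pv_modifyHead_comp]
    rfl

def pvPiecesC (cs : List Char) : List (List Char) :=
  ((List.splitOnP pvDelim cs).map PySem.Chars.strip).filter (fun p => p ≠ [])

theorem pv_scan : ∀ (cs token : List Char) (items : List String),
    (∀ x ∈ token, pvDelim x = false) →
    pvScanB items token (cs ++ ['\n'])
      = items ++ (pvPiecesC (token ++ cs)).map String.ofList := by
  intro cs
  induction cs with
  | nil =>
    intro token items h
    show pvScanB items token ['\n'] = _
    rw [pvScanB]
    simp only [show (('\n' : Char) == '\n' || ('\n' : Char) == ',') = true from rfl, if_pos]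
    rw [pvScanB]
    unfold pvPiecesC
    rw [List.append_nil, List.splitOnP_eq_single _ _ (fun x hx => by simp [h x hx])]
    by_cases hp : PySem.Chars.strip token = []
    · simp [hp]
    · simp [hp]
  | cons c cs ih =>
    intro token items h
    rw [List.cons_append, pvScanB]
    by_cases hd : pvDelim c = true
    · rw [show (c == '\n' || c == ',') = pvDelim c from rfl, hd]
      simp only [if_pos]
      rw [ih [] _ (by simp)]
      unfold pvPiecesC
      rw [pv_splitOnP_prefix pvDelim token (c :: cs) h, List.splitOnP_cons, hd]
      simp only [if_pos, List.modifyHead_cons, List.append_nil, List.map_cons, List.filter_cons,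
        List.nil_append]
      by_cases hp : PySem.Chars.strip token = []
      · simp [hp]
      · simp [hp]
    · have hd' : pvDelim c = false := by simpa using hd
      rw [show (c == '\n' || c == ',') = pvDelim c from rfl, hd']
      simp only [Bool.false_eq_true, if_false]
      rw [ih (token ++ [c]) items (by
        intro x hx
        rcases List.mem_append.1 hx with hx | hx
        · exact h x hx
        · simp at hx; subst hx; simpa using hd')]
      simp [List.append_assoc]

def pvLineItemsC (l : List Char) : List (List Char) :=
  ((List.splitOnP (fun x => x == ',') l).map PySem.Chars.strip).filter (fun p => p ≠ [])

theorem pv_strip_ofList (l : List Char) :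
    PySem.Str.strip (String.ofList l) = String.ofList (PySem.Chars.strip l) := by
  simp [PySem.Str.strip]

theorem pv_split?_ofList (l : List Char) :
    PySem.Str.split? (String.ofList l) ","
      = some ((List.splitOnP (fun x => x == ',') l).map String.ofList) := by
  rw [PySem.Str.split?]
  simp only [String.toList_ofList, show (",").toList = [','] from rfl]
  rw [show PySem.Chars.split? l [','] = some (PySem.Chars.splitOn l [',']) from rfl]
  rw [pv_splitOn_single]
  rfl

theorem pv_lineA (l : List Char) :
    (if PySem.Str.isIn "," (String.ofList l) then
      (((PySem.Str.split? (String.ofList l) ",").getD []).map PySem.Str.strip).filter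
        (fun item => item ≠ "")
     else if PySem.Str.strip (String.ofList l) ≠ "" then [PySem.Str.strip (String.ofList l)]
     else [])
    = (pvLineItemsC l).map String.ofList := by
  by_cases hm : (',' : Char) ∈ l
  · have hin : PySem.Str.isIn "," (String.ofList l) = true := by
      rw [PySem.Str.isIn]
      simp only [String.toList_ofList, show (",").toList = [','] from rfl]
      exact (PySem.Chars.isIn_iff_infix _ _).2 ((List.singleton_infix_iff ',' l).2 hm)
    rw [hin]
    simp only [if_pos, pv_split?_ofList, Option.getD_some]
    rw [List.map_map]
    have : PySem.Str.strip ∘ String.ofList = String.ofList ∘ PySem.Chars.strip := by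
      funext x; simp [pv_strip_ofList]
    rw [this, ← List.map_map, List.filter_map]
    unfold pvLineItemsC
    congr 1
    apply List.filter_congr
    intro x _
    simp [String.ofList_eq_empty_iff]
  · have hin : PySem.Str.isIn "," (String.ofList l) = false := by
      rw [PySem.Str.isIn]
      simp only [String.toList_ofList, show (",").toList = [','] from rfl]
      rw [PySem.Chars.isIn_eq_false_iff]
      intro hinf
      exact hm ((List.singleton_infix_iff ',' l).1 hinf)
    rw [hin]
    simp only [Bool.false_eq_true, if_false]
    unfold pvLineItemsC
    rw [List.splitOnP_eq_single _ _ (fun x hx => by simp; rintro rfl; exact hm hx)]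
    simp only [List.map_cons, List.map_nil, List.filter_cons, List.filter_nil]
    rw [pv_strip_ofList]
    by_cases hp : PySem.Chars.strip l = []
    · simp [hp]
    · simp [hp, String.ofList_eq_empty_iff]

theorem pv_itemsA (s : String) :
    ((PySem.Str.split? s "\n").getD []).foldl (fun acc line =>
        if PySem.Str.isIn "," line then
          acc ++ (((PySem.Str.split? line ",").getD []).map PySem.Str.strip).filter
            (fun item => item ≠ "")
        else if PySem.Str.strip line ≠ "" then acc ++ [PySem.Str.strip line]
        else acc) ([] : List String)
      = (pvPiecesC s.toList).map String.ofList := by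
  have hsplit : PySem.Str.split? s "\n"
      = some ((List.splitOnP (fun x => x == '\n') s.toList).map String.ofList) := by
    rw [PySem.Str.split?]
    simp only [show ("\n").toList = ['\n'] from rfl]
    rw [show PySem.Chars.split? s.toList ['\n'] = some (PySem.Chars.splitOn s.toList ['\n']) from rfl]
    rw [pv_splitOn_single]
    rfl
  rw [hsplit, Option.getD_some]
  have hbody : (fun (acc : List String) (line : String) =>
      if PySem.Str.isIn "," line then
        acc ++ (((PySem.Str.split? line ",").getD []).map PySem.Str.strip).filter
          (fun item => item ≠ "")
      else if PySem.Str.strip line ≠ "" then acc ++ [PySem.Str.strip line]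
      else acc)
    = (fun acc line => acc ++
        (if PySem.Str.isIn "," line then
          (((PySem.Str.split? line ",").getD []).map PySem.Str.strip).filter
            (fun item => item ≠ "")
         else if PySem.Str.strip line ≠ "" then [PySem.Str.strip line] else [])) := by
    funext acc line
    split_ifs with h1 h2 <;> simp
  rw [hbody, PySem.List.foldl_append_eq_flatMap, List.nil_append, List.flatMap_map]
  have hline : ∀ l : List Char,
      (fun line => if PySem.Str.isIn "," line then
          (((PySem.Str.split? line ",").getD []).map PySem.Str.strip).filter
            (fun item => item ≠ "")
        else if PySem.Str.strip line ≠ "" then [PySem.Str.strip line] else [])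
        (String.ofList l) = (pvLineItemsC l).map String.ofList := fun l => pv_lineA l
  rw [funext hline]
  unfold pvPiecesC pvLineItemsC
  rw [pv_split_both, List.map_flatMap, List.filter_flatMap, List.map_flatMap]

theorem pv_strip_nil_forall (l : List Char) (h : PySem.Chars.strip l = []) :
    ∀ x ∈ l, PySem.Chars.isspace x = true := by
  have hm : ∀ x ∈ PySem.Chars.lstrip l, PySem.Chars.isspace x = true := by
    have h1 : List.dropWhile PySem.Chars.isspace (PySem.Chars.lstrip l).reverse = [] := by
      have := congrArg List.reverse h
      simpa [PySem.Chars.strip, PySem.Chars.rstrip] using this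
    intro x hx
    exact List.dropWhile_eq_nil_iff.1 h1 x (by simpa using hx)
  intro x hx
  rw [← List.takeWhile_append_dropWhile (p := PySem.Chars.isspace) (l := l)] at hx
  rcases List.mem_append.1 hx with hx | hx
  · exact List.mem_takeWhile_imp hx
  · exact hm x hx

theorem pv_strip_nil_of_forall (l : List Char) (h : ∀ x ∈ l, PySem.Chars.isspace x = true) :
    PySem.Chars.strip l = [] := by
  have h1 : PySem.Chars.lstrip l = [] := List.dropWhile_eq_nil_iff.2 h
  show PySem.Chars.rstrip (PySem.Chars.lstrip l) = []
  rw [h1]; rfl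

theorem pv_splitOnP_sublist (p : Char → Bool) : ∀ (l : List Char),
    ∀ piece ∈ List.splitOnP p l, piece.Sublist l := by
  intro l
  induction l with
  | nil => intro piece hp; simp [List.splitOnP_nil] at hp; simp [hp]
  | cons c l ih =>
    intro piece hp
    rw [List.splitOnP_cons] at hp
    by_cases hc : p c = true
    · rw [hc] at hp
      simp only [if_pos, List.mem_cons] at hp
      rcases hp with rfl | hp
      · simp
      · exact (ih piece hp).cons c
    · rw [show p c = false by simpa using hc] at hp
      simp only [Bool.false_eq_true, if_false] at hp
      obtain ⟨h, t, hht⟩ : ∃ h t, List.splitOnP p l = h :: t := by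
        cases hcs : List.splitOnP p l with
        | nil => exact absurd hcs (List.splitOnP_ne_nil _ _)
        | cons a t => exact ⟨a, t, rfl⟩
      rw [hht] at hp
      simp only [List.modifyHead_cons, List.mem_cons] at hp
      rcases hp with rfl | hp
      · exact (ih h (by rw [hht]; simp)).cons₂ c
      · exact ((ih piece (by rw [hht]; simp [hp]))).cons c

theorem pv_pieces_nil (cs : List Char) (h : PySem.Chars.strip cs = []) : pvPiecesC cs = [] := by
  have hall := pv_strip_nil_forall cs h
  unfold pvPiecesC
  rw [List.filter_eq_nil_iff]
  intro a ha
  simp only [List.mem_map] at ha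
  obtain ⟨piece, hpiece, rfl⟩ := ha
  have : PySem.Chars.strip piece = [] :=
    pv_strip_nil_of_forall piece (fun x hx =>
      hall x ((pv_splitOnP_sublist pvDelim cs piece hpiece).mem hx))
  simp [this]

theorem pv_final (s : String) : get_criteria_from_text s = get_criteria_from_text_alt s := by
  unfold get_criteria_from_text get_criteria_from_text_alt
  have hB : pvScanB [] [] (s.toList ++ ['\n']) = (pvPiecesC s.toList).map String.ofList := by
    simpa using pv_scan s.toList [] [] (by simp)
  have hstr : PySem.Str.strip s = String.ofList (PySem.Chars.strip s.toList) := by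
    simp [PySem.Str.strip]
  rw [hB, pv_itemsA, hstr]
  by_cases hs : PySem.Chars.strip s.toList = []
  · rw [if_pos (by simp [hs])]
    rw [pv_pieces_nil s.toList hs]
    simp [hs]
  · rw [if_neg (by simp [String.ofList_eq_empty_iff, hs])]
    by_cases hI : pvPiecesC s.toList = []
    · rw [hI]
      simp [String.ofList_eq_empty_iff, hs]
    · have : (pvPiecesC s.toList).map String.ofList ≠ [] := by simp [hI]
      simp only [this, false_and]
      simp [this]

-- ===== VERDICT (by name: the statement is the Claim_ definition above) =====
theorem get_criteria_from_text_spec : Claim_equal_get_criteria_from_text := by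
  intro s _
  exact pv_final s
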